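-- pv_equiv track=rewrite | github.com/s2dim/Algorithm | 프로그래머스/3/12987. 숫자 게임/숫자 게임.py | solution
-- ===== SOURCE A (Python) =====
-- def solution(A, B):
--
--     A.sort()
--     B.sort()
--
--     aidx = 0
--     bidx = 0
--     cnt = 0
--     n = len(A)
--
--
--     while aidx < n and bidx < n:
--         if A[aidx] < B[bidx]:
--             aidx += 1
--             bidx += 1
--             cnt += 1
--         else:
--             bidx += 1
--
--
--     return cnt
-- ===== SOURCE B (Python) =====
-- def solution(A, B):
--     A.sort()
--     B.sort()
--     n = len(A)
--
--     # k wins are achievable iff the k weakest cards of A beat, pairwise in order,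
--     # the k strongest of the n cards of B in play; this predicate is monotone in k,
--     # so the answer is found by binary search on k.
--     def wins(k):
--         return all(A[i] < B[n - k + i] for i in range(k))
--
--     lo, hi = 0, n
--     while lo < hi:
--         mid = (lo + hi + 1) // 2
--         if wins(mid):
--             lo = mid
--         else:
--             hi = mid - 1
--     return lo
-- ===== Notes on version B (the rewrite author's own statement) =====
-- stated objective: alternative
-- what changed: B replaces A's greedy two-pointer scan by a binary search on the answer k, with a monotone feasibility check 'the k weakest of A beat the k strongest of B pairwise'.
import Mathlib
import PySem

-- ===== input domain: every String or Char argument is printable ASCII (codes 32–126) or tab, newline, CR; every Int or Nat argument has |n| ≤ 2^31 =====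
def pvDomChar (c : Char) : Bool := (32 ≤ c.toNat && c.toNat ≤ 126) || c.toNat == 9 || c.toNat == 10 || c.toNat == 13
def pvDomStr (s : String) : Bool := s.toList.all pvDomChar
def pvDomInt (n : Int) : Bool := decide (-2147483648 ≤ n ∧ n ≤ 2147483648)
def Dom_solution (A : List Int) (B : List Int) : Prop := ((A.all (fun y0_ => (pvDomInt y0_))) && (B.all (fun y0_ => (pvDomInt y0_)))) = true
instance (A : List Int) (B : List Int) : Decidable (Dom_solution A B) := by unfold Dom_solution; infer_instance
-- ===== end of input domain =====

-- B replaces A's greedy two-pointer scan by a binary search on the answer k, checking the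
-- monotone predicate "the k weakest of A beat the k strongest of B's n cards in play pairwise";
-- return values proved equal. Both A and B sort their arguments in place (same mutation);
-- the equivalence proved is about the return value.

-- ===== PORT A =====
-- while aidx < n and bidx < n: …  (fuel = n suffices: bidx increases every iteration)
def solLoopA (a b : List Int) (n : Nat) : Nat → Nat → Nat → Int → Int
  | 0, _, _, cnt => cnt
  | fuel + 1, aidx, bidx, cnt =>
    if aidx < n ∧ bidx < n then
      match PySem.List.pyGet? a (aidx : Int), PySem.List.pyGet? b (bidx : Int) with
      | some av, some bv =>
        if av < bv then solLoopA a b n fuel (aidx + 1) (bidx + 1) (cnt + 1)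
        else solLoopA a b n fuel aidx (bidx + 1) cnt
      | _, _ => cnt   -- IndexError (excluded by Pre_solution)
    else cnt

def solution (A : List Int) (B : List Int) : Int :=
  let a := PySem.List.sorted A (fun x => x) false
  let b := PySem.List.sorted B (fun x => x) false
  let n := A.length
  solLoopA a b n n 0 0 0

-- ===== PORT B =====
-- wins(k) = all(A[i] < B[n - k + i] for i in range(k))
def winsB (a b : List Int) (n k : Int) : Bool :=
  (PySem.List.pyRange 0 k 1).all (fun i =>
    match PySem.List.pyGet? a i, PySem.List.pyGet? b (n - k + i) with
    | some x, some y => decide (x < y)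
    | _, _ => false)   -- IndexError; unreachable for the calls the search makes

-- while lo < hi: …  (fuel = n + 1 suffices: hi - lo shrinks every iteration)
def bsLoop (a b : List Int) (n : Int) : Nat → Int → Int → Int
  | 0, lo, _ => lo
  | fuel + 1, lo, hi =>
    if lo < hi then
      let mid := PySem.Int.floordiv (lo + hi + 1) 2
      if winsB a b n mid then bsLoop a b n fuel mid hi
      else bsLoop a b n fuel lo (mid - 1)
    else lo

def solution_alt (A : List Int) (B : List Int) : Int :=
  let a := PySem.List.sorted A (fun x => x) false
  let b := PySem.List.sorted B (fun x => x) false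
  let n := A.length
  bsLoop a b (n : Int) (n + 1) 0 (n : Int)

-- ===== PRECONDITION & SPEC =====
-- Pre_ is exactly the set of inputs on which the Python A returns: when len(B) < len(A)
-- A raises IndexError (its loop indexes B at positions up to len(A) - 1).
def Pre_solution (A : List Int) (B : List Int) : Prop := A.length ≤ B.length
instance (A : List Int) (B : List Int) : Decidable (Pre_solution A B) := by unfold Pre_solution; infer_instance
def pvWitness_solution : List Int × List Int := ([1, 3, 2], [2, 1, 4])

def Spec_solution (A : List Int) (B : List Int) (out : Int) : Prop := out = solution_alt A B
instance (A : List Int) (B : List Int) (out : Int) : Decidable (Spec_solution A B out) := by unfold Spec_solution; infer_instance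

-- ===== CLAIM (what is proved, stated in full; the proofs are below) =====
def Claim_equal_solution : Prop := ∀ (A : List Int) (B : List Int), Dom_solution A B → Pre_solution A B → Spec_solution A B (solution A B)

-- ===== LEMMAS AND PROOFS =====

-- mm a b: size of a maximum order-preserving matching pairing a-elements with strictly larger
-- b-elements (LCS-style DP).  A's greedy loop and B's binary search are both proved equal to it.
def mm : List Int → List Int → Nat
  | [], _ => 0
  | _, [] => 0
  | x :: a, y :: b => max (max (mm a (y :: b)) (mm (x :: a) b)) (if x < y then mm a b + 1 else 0)
termination_by a b => a.length + b.length
decreasing_by all_goals (simp; try omega)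

theorem mm_nil_right (a : List Int) : mm a [] = 0 := by cases a <;> simp [mm]

theorem mm_cons (x y : Int) (a b : List Int) :
    mm (x :: a) (y :: b) = max (max (mm a (y :: b)) (mm (x :: a) b)) (if x < y then mm a b + 1 else 0) := by
  rw [mm]

theorem mm_le_cons_left (x : Int) (a b : List Int) : mm a b ≤ mm (x :: a) b := by
  cases b with
  | nil => simp [mm_nil_right]
  | cons y b' => rw [mm_cons]; exact le_trans (le_max_left _ _) (le_max_left _ _)

theorem mm_le_cons_right (y : Int) (a b : List Int) : mm a b ≤ mm a (y :: b) := by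
  cases a with
  | nil => simp [mm]
  | cons x a' => rw [mm_cons]; exact le_trans (le_max_right _ _) (le_max_left _ _)

theorem mm_cons_right_le (y : Int) (a b : List Int) : mm a (y :: b) ≤ mm a b + 1 := by
  induction a with
  | nil => simp [mm]
  | cons x a' ih =>
    rw [mm_cons]
    have h1 : mm a' (y :: b) ≤ mm a' b + 1 := ih
    have h2 : mm a' b ≤ mm (x :: a') b := mm_le_cons_left x a' b
    split_ifs <;> omega

theorem mm_cons_left_le (x : Int) (a b : List Int) : mm (x :: a) b ≤ mm a b + 1 := by
  induction b with
  | nil => simp [mm_nil_right]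
  | cons y b' ih =>
    rw [mm_cons]
    have h2 : mm a b' ≤ mm a (y :: b') := mm_le_cons_right y a b'
    split_ifs <;> omega

-- pairing the two heads is optimal whenever it is possible
theorem mm_pair_heads {x y : Int} (a b : List Int) (hxy : x < y) :
    mm (x :: a) (y :: b) = mm a b + 1 := by
  rw [mm_cons]
  have h1 : mm a (y :: b) ≤ mm a b + 1 := mm_cons_right_le y a b
  have h2 : mm (x :: a) b ≤ mm a b + 1 := mm_cons_left_le x a b
  simp only [if_pos hxy]
  omega

-- a head of b that beats no element of a can be dropped
theorem mm_drop_head_right {y : Int} (a b : List Int) (h : ∀ z ∈ a, ¬ z < y) :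
    mm a (y :: b) = mm a b := by
  induction a with
  | nil => simp [mm]
  | cons x a' ih =>
    have hx : ¬ x < y := h x (by simp)
    rw [mm_cons, ih (fun z hz => h z (by simp [hz]))]
    simp only [if_neg hx]
    have := mm_le_cons_left x a' b
    omega

theorem mm_le_left (a b : List Int) : mm a b ≤ a.length := by
  induction a generalizing b with
  | nil => simp [mm]
  | cons x a' ih =>
    induction b with
    | nil => simp [mm_nil_right]
    | cons y b' ihb =>
      rw [mm_cons]
      have h1 := ih (y :: b')
      have h2 := ih b'
      have h3 := ihb
      simp only [List.length_cons] at *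
      split_ifs <;> omega

theorem mm_le_right (a b : List Int) : mm a b ≤ b.length := by
  induction b generalizing a with
  | nil => simp [mm_nil_right]
  | cons y b' ih =>
    induction a with
    | nil => simp [mm]
    | cons x a' iha =>
      rw [mm_cons]
      have h1 := ih (x :: a')
      have h2 := ih a'
      have h3 := iha
      simp only [List.length_cons] at *
      split_ifs <;> omega

-- every matched pair (x, z) with x < z has x < v or v < z, so mm is bounded by these counts
theorem mm_le_counts (a b : List Int) (v : Int) :
    mm a b ≤ a.countP (fun x => decide (x < v)) + b.countP (fun z => decide (v < z)) := by
  induction a generalizing b with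
  | nil => simp [mm]
  | cons x a' ih =>
    induction b with
    | nil => simp [mm_nil_right]
    | cons y b' ihb =>
      rw [mm_cons]
      have h1 := ih (y :: b')
      have h2 := ihb
      have h3 := ih b'
      have s1 : a'.countP (fun t => decide (t < v)) ≤ (x :: a').countP (fun t => decide (t < v)) :=
        (List.sublist_cons_self x a').countP_le
      have s2 : b'.countP (fun z => decide (v < z)) ≤ (y :: b').countP (fun z => decide (v < z)) :=
        (List.sublist_cons_self y b').countP_le
      by_cases hxy : x < y
      · have key : a'.countP (fun t => decide (t < v)) + b'.countP (fun z => decide (v < z)) + 1 ≤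
            (x :: a').countP (fun t => decide (t < v)) + (y :: b').countP (fun z => decide (v < z)) := by
          by_cases hv : x < v
          · have hx1 : (x :: a').countP (fun t => decide (t < v)) =
                a'.countP (fun t => decide (t < v)) + 1 := by simp [hv]
            omega
          · have hy : v < y := by omega
            have hy1 : (y :: b').countP (fun z => decide (v < z)) =
                b'.countP (fun z => decide (v < z)) + 1 := by simp [hy]
            omega
        rw [if_pos hxy]
        omega
      · rw [if_neg hxy]
        omega

-- sorted prefix bound: every element of take (j+1) is ≤ the element at j
theorem sorted_mem_take_le {b : List Int} (hb : b.Pairwise (· ≤ ·)) {j : Nat} (hj : j < b.length)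
    {z : Int} (hz : z ∈ b.take (j + 1)) : z ≤ b[j] := by
  have htake : b.take (j + 1) = b.take j ++ [b[j]] := by
    rw [List.take_add_one]
    simp [List.getElem?_eq_getElem hj]
  rw [htake] at hz
  have hp : (b.take j ++ [b[j]]).Pairwise (· ≤ ·) := by
    rw [← htake]; exact hb.sublist (List.take_sublist ..)
  rcases List.mem_append.mp hz with h1 | h2
  · exact (List.pairwise_append.mp hp).2.2 z h1 b[j] (by simp)
  · simp at h2; omega

-- sorted suffix bound: every element of drop i is ≥ the element at i
theorem sorted_mem_drop_ge {a : List Int} (ha : a.Pairwise (· ≤ ·)) {i : Nat} (hi : i < a.length)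
    {z : Int} (hz : z ∈ a.drop i) : a[i] ≤ z := by
  have hdrop : a.drop i = a[i] :: a.drop (i + 1) := List.drop_eq_getElem_cons hi
  have hp : (a[i] :: a.drop (i + 1)).Pairwise (· ≤ ·) := by
    rw [← hdrop]; exact ha.sublist (List.drop_sublist _ _)
  rw [hdrop] at hz
  rcases List.mem_cons.mp hz with h1 | h2
  · omega
  · exact (List.pairwise_cons.mp hp).1 z h2

theorem sorted_getElem_le {l : List Int} (hl : l.Pairwise (· ≤ ·)) {i j : Nat}
    (hi : i < l.length) (hj : j < l.length) (hij : i ≤ j) : l[i] ≤ l[j] := by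
  rcases eq_or_lt_of_le hij with h | h
  · subst h; rfl
  · exact List.pairwise_iff_getElem.mp hl i j hi hj h

-- Feas a c k: the k smallest elements of a beat the k largest of c, pairwise in order
def Feas (a c : List Int) (k : Nat) : Prop :=
  ∀ i, i < k → a.getD i 0 < c.getD (c.length - k + i) 0

-- mm's own value is feasible (the counting argument)
theorem mm_feasible {a cs : List Int} (ha : a.Pairwise (· ≤ ·)) (hc : cs.Pairwise (· ≤ ·)) :
    Feas a cs (mm a cs) := by
  intro i hi
  set m := mm a cs with hm
  have hma : m ≤ a.length := mm_le_left a cs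
  have hmc : m ≤ cs.length := mm_le_right a cs
  have hia : i < a.length := by omega
  have hjc : cs.length - m + i < cs.length := by omega
  rw [List.getD_eq_getElem a 0 hia, List.getD_eq_getElem cs 0 hjc]
  by_contra hcon
  rw [not_lt] at hcon
  set v := a[i] with hv
  -- count of a-elements < v is at most i
  have hca : a.countP (fun x => decide (x < v)) ≤ i := by
    have hsplit : a = a.take i ++ a.drop i := (List.take_append_drop i a).symm
    have hdrop0 : (a.drop i).countP (fun x => decide (x < v)) = 0 := by
      rw [List.countP_eq_zero]
      intro z hz
      have := sorted_mem_drop_ge ha hia hz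
      simp only [decide_eq_true_eq]
      omega
    calc a.countP (fun x => decide (x < v))
        = (a.take i).countP (fun x => decide (x < v)) + (a.drop i).countP (fun x => decide (x < v)) := by
          conv_lhs => rw [hsplit]
          rw [List.countP_append]
      _ ≤ (a.take i).length + 0 := by rw [hdrop0]; exact Nat.add_le_add_right List.countP_le_length 0
      _ ≤ i := by simp [List.length_take]
  -- count of cs-elements > v is at most m - i - 1
  have hccb : cs.countP (fun z => decide (v < z)) ≤ m - i - 1 := by
    have hsplit : cs = cs.take (cs.length - m + i + 1) ++ cs.drop (cs.length - m + i + 1) :=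
      (List.take_append_drop (cs.length - m + i + 1) cs).symm
    have htake0 : (cs.take (cs.length - m + i + 1)).countP (fun z => decide (v < z)) = 0 := by
      rw [List.countP_eq_zero]
      intro z hz
      have h1 : z ≤ cs[cs.length - m + i]'hjc := sorted_mem_take_le hc hjc hz
      simp only [decide_eq_true_eq]
      omega
    calc cs.countP (fun z => decide (v < z))
        = (cs.take (cs.length - m + i + 1)).countP (fun z => decide (v < z)) +
            (cs.drop (cs.length - m + i + 1)).countP (fun z => decide (v < z)) := by
          conv_lhs => rw [hsplit]
          rw [List.countP_append]
      _ ≤ 0 + (cs.drop (cs.length - m + i + 1)).length := by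
          rw [htake0]; exact Nat.add_le_add_left List.countP_le_length 0
      _ ≤ m - i - 1 := by rw [List.length_drop]; omega
  have := mm_le_counts a cs v
  omega

-- any feasible k is at most mm (exhibit the pairing)
theorem mm_ge_of_feasible : ∀ (c a : List Int) (k : Nat), k ≤ a.length → k ≤ c.length →
    Feas a c k → k ≤ mm a c := by
  intro c
  induction c with
  | nil => intro a k _ hk _; have hk0 : k = 0 := by simpa using hk
           simp [hk0]
  | cons y c' ih =>
    intro a k hka hkc hf
    by_cases hk' : k ≤ c'.length
    · refine le_trans (ih a k hka hk' ?_) (mm_le_cons_right y a c')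
      intro i hi
      have hidx : (y :: c').length - k + i = (c'.length - k + i) + 1 := by
        simp only [List.length_cons]; omega
      have := hf i hi
      rwa [hidx, List.getD_cons_succ] at this
    · have hk : k = c'.length + 1 := by simp at hkc ⊢; omega
      cases a with
      | nil => simp at hka; omega
      | cons x a' =>
        have hxy : x < y := by
          have := hf 0 (by omega)
          have hidx : (y :: c').length - k + 0 = 0 := by simp [hk]
          rwa [hidx, List.getD_cons_zero, List.getD_cons_zero] at this
        have hrec : k - 1 ≤ mm a' c' := by
          apply ih a' (k - 1) (by simp at hka; omega) (by omega)
          intro i hi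
          have := hf (i + 1) (by omega)
          have hidx : (y :: c').length - k + (i + 1) = (c'.length - (k - 1) + i) + 1 := by
            simp only [List.length_cons]; omega
          rwa [hidx, List.getD_cons_succ, List.getD_cons_succ] at this
        rw [mm_cons]
        have : k ≤ (if x < y then mm a' c' + 1 else 0) := by rw [if_pos hxy]; omega
        omega

-- feasibility is downward monotone on a sorted c
theorem feas_mono {a c : List Int} (hc : c.Pairwise (· ≤ ·)) {k m : Nat}
    (hkm : k ≤ m) (hmc : m ≤ c.length) (hm : Feas a c m) : Feas a c k := by
  intro i hi
  have h1 := hm i (by omega)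
  have hjm : c.length - m + i < c.length := by omega
  have hjk : c.length - k + i < c.length := by omega
  rw [List.getD_eq_getElem c 0 hjm] at h1
  rw [List.getD_eq_getElem c 0 hjk]
  have h2 := sorted_getElem_le hc hjm hjk (show c.length - m + i ≤ c.length - k + i by omega)
  omega

-- A's greedy loop computes mm on the sorted lists
theorem bridgeA (a b : List Int) (ha : a.Pairwise (· ≤ ·)) (hlen : a.length ≤ b.length) :
    ∀ (fuel aidx bidx : Nat) (cnt : Int), aidx ≤ bidx → a.length - bidx ≤ fuel →
    solLoopA a b a.length fuel aidx bidx cnt = cnt + mm (a.drop aidx) ((b.take a.length).drop bidx) := by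
  intro fuel
  induction fuel with
  | zero =>
    intro aidx bidx cnt hab hf
    have : (b.take a.length).drop bidx = [] := List.drop_eq_nil_of_le (by simp [List.length_take]; omega)
    simp [solLoopA, this, mm_nil_right]
  | succ fuel ih =>
    intro aidx bidx cnt hab hf
    rw [solLoopA]
    by_cases hc : aidx < a.length ∧ bidx < a.length
    · obtain ⟨hai, hbi⟩ := hc
      have hbl : bidx < b.length := by omega
      have hbt : bidx < (b.take a.length).length := by simp [List.length_take]; omega
      have hga : PySem.List.pyGet? a (aidx : Int) = some a[aidx] := by
        rw [PySem.List.pyGet?_natCast]; simp [List.getElem?_eq_getElem hai]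
      have hgb : PySem.List.pyGet? b (bidx : Int) = some b[bidx] := by
        rw [PySem.List.pyGet?_natCast]; simp [List.getElem?_eq_getElem hbl]
      have hda : a.drop aidx = a[aidx] :: a.drop (aidx + 1) := List.drop_eq_getElem_cons hai
      have hdb : (b.take a.length).drop bidx = b[bidx] :: (b.take a.length).drop (bidx + 1) := by
        rw [List.drop_eq_getElem_cons hbt, List.getElem_take]
      rw [if_pos ⟨hai, hbi⟩, hga, hgb]
      dsimp only
      by_cases hlt : a[aidx] < b[bidx]
      · rw [if_pos hlt, ih (aidx + 1) (bidx + 1) (cnt + 1) (by omega) (by omega)]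
        rw [hda, hdb, mm_pair_heads _ _ hlt]
        push_cast; ring
      · rw [if_neg hlt, ih aidx (bidx + 1) cnt (by omega) (by omega)]
        rw [hdb]
        rw [mm_drop_head_right]
        intro z hz
        have := sorted_mem_drop_ge ha hai hz
        omega
    · rw [if_neg hc]
      rcases Decidable.not_and_iff_or_not.mp hc with h | h
      · have : a.drop aidx = [] := List.drop_eq_nil_of_le (by omega)
        simp [this, mm]
      · have : (b.take a.length).drop bidx = [] := List.drop_eq_nil_of_le (by simp [List.length_take]; omega)
        simp [this, mm_nil_right]

-- the B-side check computes Feas on the n smallest cards of b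
theorem winsB_iff (a b : List Int) (hab : a.length ≤ b.length) (k : Int)
    (h0 : 0 ≤ k) (hk : k ≤ (a.length : Int)) :
    winsB a b (a.length : Int) k = true ↔ Feas a (b.take a.length) k.toNat := by
  have hlen : (b.take a.length).length = a.length := by
    simp [List.length_take]; omega
  have hstep : ∀ i : Nat, i < k.toNat →
      ((match PySem.List.pyGet? a ((i : Nat) : Int),
              PySem.List.pyGet? b ((a.length : Int) - k + ((i : Nat) : Int)) with
        | some x, some y => decide (x < y)
        | _, _ => false) = true
       ↔ a.getD i 0 < (b.take a.length).getD (a.length - k.toNat + i) 0) := by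
    intro i hi
    have hia : i < a.length := by omega
    have hj : a.length - k.toNat + i < a.length := by omega
    have hjb : a.length - k.toNat + i < b.length := by omega
    have hga : PySem.List.pyGet? a ((i : Nat) : Int) = some (a[i]'hia) := by
      rw [PySem.List.pyGet?_natCast]
      simp [List.getElem?_eq_getElem hia]
    have hJ : (a.length : Int) - k + ((i : Nat) : Int) = ((a.length - k.toNat + i : Nat) : Int) := by
      omega
    have hgb : PySem.List.pyGet? b ((a.length : Int) - k + ((i : Nat) : Int)) =
        some (b[a.length - k.toNat + i]'hjb) := by
      rw [hJ, PySem.List.pyGet?_natCast]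
      simp [List.getElem?_eq_getElem hjb]
    rw [hga, hgb]
    simp only [decide_eq_true_eq]
    rw [List.getD_eq_getElem a 0 hia,
        List.getD_eq_getElem (b.take a.length) 0 (by rw [hlen]; exact hj),
        List.getElem_take]
  unfold winsB Feas
  rw [List.all_eq_true]
  simp only [hlen]
  constructor
  · intro h i hi
    exact (hstep i hi).mp (h _ (by rw [PySem.List.mem_pyRange_one]; omega))
  · intro h x hx
    rw [PySem.List.mem_pyRange_one] at hx
    have hxe : x = ((x.toNat : Nat) : Int) := by omega
    rw [hxe]
    exact (hstep x.toNat (by omega)).mpr (h _ (by omega))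

-- the binary search returns m when winsB characterises k ≤ m
theorem bsLoop_eq (a b : List Int) (n : Int) (m : Nat)
    (hchar : ∀ k : Int, 0 ≤ k → k ≤ n → (winsB a b n k = true ↔ k ≤ (m : Int))) :
    ∀ (fuel : Nat) (lo hi : Int), 0 ≤ lo → lo ≤ (m : Int) → (m : Int) ≤ hi → hi ≤ n →
    hi - lo < (fuel : Int) → bsLoop a b n fuel lo hi = m := by
  intro fuel
  induction fuel with
  | zero => intro lo hi h1 h2 h3 h4 h5; simp at h5; omega
  | succ fuel ih =>
    intro lo hi h1 h2 h3 h4 h5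
    rw [bsLoop]
    by_cases hlh : lo < hi
    · rw [if_pos hlh]
      have hmid := PySem.Int.floordiv_two_mid_bounds (show lo + 1 ≤ hi by omega)
      have heq : lo + hi + 1 = lo + 1 + hi := by ring
      rw [heq]
      set mid := PySem.Int.floordiv (lo + 1 + hi) 2 with hmd
      obtain ⟨hm1, hm2⟩ := hmid
      by_cases hw : winsB a b n mid = true
      · rw [if_pos hw]
        have hmle : mid ≤ (m : Int) := (hchar mid (by omega) (by omega)).mp hw
        exact ih mid hi (by omega) hmle h3 h4 (by push_cast at h5 ⊢; omega)
      · rw [if_neg hw]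
        have : ¬ mid ≤ (m : Int) := fun hle => hw ((hchar mid (by omega) (by omega)).mpr hle)
        exact ih lo (mid - 1) h1 h2 (by omega) (by omega) (by push_cast at h5 ⊢; omega)
    · rw [if_neg hlh]; omega

-- ===== VERDICT (by name: the statement is the Claim_ definition above) =====
theorem solution_spec : Claim_equal_solution := by
  intro A B _hdom hpre
  unfold Spec_solution solution solution_alt
  have hpre' : A.length ≤ B.length := hpre
  set a := PySem.List.sorted A (fun x => x) false with hadef
  set b := PySem.List.sorted B (fun x => x) false with hbdef
  have hla : a.length = A.length := PySem.List.length_sorted A (fun x => x) false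
  have hlb : b.length = B.length := PySem.List.length_sorted B (fun x => x) false
  have ha : a.Pairwise (· ≤ ·) := by simpa using PySem.List.sorted_pairwise A (fun x => x)
  have hb : b.Pairwise (· ≤ ·) := by simpa using PySem.List.sorted_pairwise B (fun x => x)
  set c := b.take a.length with hcdef
  have hc : c.Pairwise (· ≤ ·) := hb.sublist (List.take_sublist ..)
  have hlc : c.length = a.length := by simp [hcdef, List.length_take]; omega
  set m := mm a c with hmdef
  have hma : m ≤ a.length := mm_le_left a c
  have hmc : m ≤ c.length := mm_le_right a c
  -- A's loop computes mm
  have hA : solLoopA a b A.length A.length 0 0 0 = 0 + mm (a.drop 0) ((b.take A.length).drop 0) := by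
    have := bridgeA a b ha (by omega) A.length 0 0 0 (by omega) (by omega)
    rwa [hla] at this
  -- B's binary search computes mm
  have hchar : ∀ k : Int, 0 ≤ k → k ≤ (a.length : Int) →
      (winsB a b (a.length : Int) k = true ↔ k ≤ (m : Int)) := by
    intro k h0 hk
    rw [winsB_iff a b (by omega) k h0 hk]
    constructor
    · intro hf
      have := mm_ge_of_feasible c a k.toNat (by omega) (by omega) hf
      omega
    · intro hle
      exact feas_mono hc (by omega) hmc (mm_feasible ha hc)
  have hB : bsLoop a b (a.length : Int) (a.length + 1) 0 (a.length : Int) = m :=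
    bsLoop_eq a b (a.length : Int) m hchar (a.length + 1) 0 (a.length : Int)
      (by omega) (by omega) (by omega) (by omega) (by push_cast; omega)
  rw [hla] at hB
  simp only [hA]
  rw [hB]
  simp only [List.drop_zero]
  rw [← hla, ← hcdef, ← hmdef]
  omega
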